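-- pv_equiv track=rewrite | github.com/clp-research/slurk-bots | reference/scores/calculate_reference_metrics.py | get_instances
-- ===== SOURCE A (Python) =====
-- def get_instances(scores):
--     episode_instances = {}
--     for room, grid_types in scores.items():
--         for grid, instances in grid_types.items():
--             if grid in episode_instances:
--                 new_inst = [
--                     inst for inst in instances if inst not in episode_instances[grid]
--                 ]
--                 episode_instances[grid].extend(new_inst)
--             else:
--                 episode_instances[grid] = [inst for inst in instances]
--     return episode_instances
-- ===== SOURCE B (Python) =====
-- def get_instances(scores):
--     # Two-pass decomposition: gather all per-room instance lists per grid,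
--     # then merge each grid's chunks with first-seen-room deduplication.
--     gathered = {}
--     for room, grid_types in scores.items():
--         for grid, instances in grid_types.items():
--             gathered.setdefault(grid, []).append(list(instances))
--     result = {}
--     for grid, chunks in gathered.items():
--         merged = []
--         for chunk in chunks:
--             seen = merged[:]
--             merged.extend(inst for inst in chunk if inst not in seen)
--         result[grid] = merged
--     return result
-- ===== Notes on version B (the rewrite author's own statement) =====
-- stated objective: alternative
-- what changed: A's single interleaved merge-and-dedup pass is split into two passes: first gather each grid's per-room instance lists into an intermediate dict of chunks, then dedup-merge each grid's chunks into the result dict.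
import Mathlib
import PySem

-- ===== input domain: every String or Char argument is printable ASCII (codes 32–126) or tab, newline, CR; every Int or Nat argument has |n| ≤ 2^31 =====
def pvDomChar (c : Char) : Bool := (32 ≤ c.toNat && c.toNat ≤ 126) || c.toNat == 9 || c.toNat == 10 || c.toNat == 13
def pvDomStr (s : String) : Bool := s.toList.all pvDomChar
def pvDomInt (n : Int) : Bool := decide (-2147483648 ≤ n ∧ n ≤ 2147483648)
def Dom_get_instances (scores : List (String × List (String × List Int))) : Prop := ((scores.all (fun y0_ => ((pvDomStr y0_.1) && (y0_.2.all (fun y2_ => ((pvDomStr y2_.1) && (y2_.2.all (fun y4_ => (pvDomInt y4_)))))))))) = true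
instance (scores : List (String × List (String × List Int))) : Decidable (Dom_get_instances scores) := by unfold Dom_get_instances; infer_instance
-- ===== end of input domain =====

-- B splits A's interleaved merge-and-dedup into two passes (gather per-grid chunks, then dedup-merge); alternative decomposition, not faster.

-- ===== PORT A =====
def get_instances (scores : List (String × List (String × List Int))) : List (String × List Int) :=
  (scores.foldl (fun ep rt =>
    rt.2.foldl (fun ep gi =>
      match ep.get? gi.1 with
      | some cur => ep.insert gi.1 (cur ++ gi.2.filter (fun inst => !cur.contains inst))
      | none => ep.insert gi.1 (gi.2.map (fun inst => inst))) ep)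
    PySem.Dict.empty).items

-- ===== PORT B =====
-- Source B's inner chunk-merge loop (merged grows by the chunk elements not already present)
def pvMerge (chunks : List (List Int)) : List Int :=
  chunks.foldl (fun merged chunk => merged ++ chunk.filter (fun inst => !merged.contains inst)) []

def get_instances_alt (scores : List (String × List (String × List Int))) : List (String × List Int) :=
  let gathered := scores.foldl (fun g rt =>
    rt.2.foldl (fun g gi => g.modify gi.1 [] (fun cs => cs ++ [gi.2])) g) PySem.Dict.empty
  (gathered.items.foldl (fun res p => res.insert p.1 (pvMerge p.2)) PySem.Dict.empty).items

-- ===== PRECONDITION & SPEC =====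
def Spec_get_instances (scores : List (String × List (String × List Int))) (out : List (String × List Int)) : Prop := out = get_instances_alt scores
instance (scores : List (String × List (String × List Int))) (out : List (String × List Int)) : Decidable (Spec_get_instances scores out) := by unfold Spec_get_instances; infer_instance

-- ===== CLAIM (what is proved, stated in full; the proofs are below) =====
def Claim_equal_get_instances : Prop := ∀ (scores : List (String × List (String × List Int))), Dom_get_instances scores → Spec_get_instances scores (get_instances scores)

-- ===== LEMMAS AND PROOFS =====

/-- map a function over the values of a Dict, keeping keys and order -/
def pvMapVal (f : List (List Int) → List Int) (d : PySem.Dict String (List (List Int))) : PySem.Dict String (List Int) :=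
  PySem.Dict.mk (d.items.map (fun p => (p.1, f p.2)))

theorem pvMapVal_get? (f : List (List Int) → List Int) (d : PySem.Dict String (List (List Int))) (k : String) :
    (pvMapVal f d).get? k = (d.get? k).map f := by
  obtain ⟨l⟩ := d
  induction l with
  | nil => simp [pvMapVal, PySem.Dict.get?]
  | cons p rest ih =>
    obtain ⟨pk, pv⟩ := p
    simp only [pvMapVal, List.map_cons, PySem.Dict.get?_mk_cons]
    split_ifs with h
    · rfl
    · simpa [pvMapVal] using ih

theorem pvMapVal_contains (f : List (List Int) → List Int) (d : PySem.Dict String (List (List Int))) (k : String) :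
    (pvMapVal f d).contains k = d.contains k := by
  rw [PySem.Dict.contains_eq_isSome_get?, PySem.Dict.contains_eq_isSome_get?, pvMapVal_get?]
  cases d.get? k <;> rfl

theorem pvMapVal_insert (f : List (List Int) → List Int) (d : PySem.Dict String (List (List Int))) (k : String) (v : List (List Int)) :
    pvMapVal f (d.insert k v) = (pvMapVal f d).insert k (f v) := by
  apply PySem.Dict.ext
  show List.map (fun p : String × List (List Int) => (p.1, f p.2)) (d.insert k v).items = _
  rw [PySem.Dict.items_insert, PySem.Dict.items_insert, pvMapVal_contains]
  split_ifs with h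
  · show List.map (fun p : String × List (List Int) => (p.1, f p.2)) _ =
      List.map (fun p => if (p.1 == k) = true then (k, f v) else p)
        (List.map (fun p : String × List (List Int) => (p.1, f p.2)) d.items)
    rw [List.map_map, List.map_map]
    apply List.map_congr_left
    intro p _
    by_cases hp : p.1 = k <;> simp [hp]
  · show List.map (fun p : String × List (List Int) => (p.1, f p.2)) _ = _
    simp [pvMapVal]

theorem pvModify_eq_insert (d : PySem.Dict String (List (List Int))) (k : String) (g : List (List Int) → List (List Int)) :
    d.modify k [] g = d.insert k (g (d.getD k [])) := by
  simp [PySem.Dict.modify, PySem.Dict.insert, PySem.Dict.getD, PySem.Dict.get?]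

/-- one grid step of A on the merged state equals pvMapVal of one gather step of B -/
theorem pv_step (g : PySem.Dict String (List (List Int))) (gi : String × List Int) :
    (match (pvMapVal pvMerge g).get? gi.1 with
      | some cur => (pvMapVal pvMerge g).insert gi.1 (cur ++ gi.2.filter (fun inst => !cur.contains inst))
      | none => (pvMapVal pvMerge g).insert gi.1 (gi.2.map (fun inst => inst)))
    = pvMapVal pvMerge (g.modify gi.1 [] (fun cs => cs ++ [gi.2])) := by
  rw [pvModify_eq_insert, pvMapVal_insert, pvMapVal_get?]
  have hmerge : ∀ cs : List (List Int), pvMerge (cs ++ [gi.2]) =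
      pvMerge cs ++ gi.2.filter (fun inst => !(pvMerge cs).contains inst) := by
    intro cs; simp [pvMerge, List.foldl_append]
  cases hg : g.get? gi.1 with
  | some cs =>
    simp only [Option.map_some, hmerge, PySem.Dict.getD_eq_get?_getD, hg, Option.getD_some]
  | none =>
    simp [PySem.Dict.getD_eq_get?_getD, hg, pvMerge, List.map_id']

/-- the inner (per-room) loop commutes with pvMapVal -/
theorem pv_inner (l : List (String × List Int)) (g : PySem.Dict String (List (List Int))) :
    l.foldl (fun ep gi =>
      match ep.get? gi.1 with
      | some cur => ep.insert gi.1 (cur ++ gi.2.filter (fun inst => !cur.contains inst))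
      | none => ep.insert gi.1 (gi.2.map (fun inst => inst))) (pvMapVal pvMerge g)
    = pvMapVal pvMerge (l.foldl (fun g gi => g.modify gi.1 [] (fun cs => cs ++ [gi.2])) g) := by
  induction l generalizing g with
  | nil => rfl
  | cons gi rest ih => simp only [List.foldl_cons, pv_step]; exact ih _

/-- the outer (per-room) loop commutes with pvMapVal -/
theorem pv_outer (scores : List (String × List (String × List Int))) (g : PySem.Dict String (List (List Int))) :
    scores.foldl (fun ep rt =>
      rt.2.foldl (fun ep gi =>
        match ep.get? gi.1 with
        | some cur => ep.insert gi.1 (cur ++ gi.2.filter (fun inst => !cur.contains inst))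
        | none => ep.insert gi.1 (gi.2.map (fun inst => inst))) ep) (pvMapVal pvMerge g)
    = pvMapVal pvMerge (scores.foldl (fun g rt =>
        rt.2.foldl (fun g gi => g.modify gi.1 [] (fun cs => cs ++ [gi.2])) g) g) := by
  induction scores generalizing g with
  | nil => rfl
  | cons rt rest ih => simp only [List.foldl_cons, pv_inner]; exact ih _

theorem pv_gathered_nodup (scores : List (String × List (String × List Int))) (g : PySem.Dict String (List (List Int))) (h : g.keys.Nodup) :
    (scores.foldl (fun g rt =>
      rt.2.foldl (fun g gi => g.modify gi.1 [] (fun cs => cs ++ [gi.2])) g) g).keys.Nodup := by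
  induction scores generalizing g with
  | nil => exact h
  | cons rt rest ih =>
    simp only [List.foldl_cons]
    exact ih _ (PySem.Dict.nodup_keys_foldl_modify_key _ _ _ _ _ h)

-- ===== VERDICT (by name: the statement is the Claim_ definition above) =====
theorem get_instances_spec : Claim_equal_get_instances := by
  intro scores _
  unfold Spec_get_instances get_instances get_instances_alt
  conv_lhs => rw [show (PySem.Dict.empty : PySem.Dict String (List Int)) = pvMapVal pvMerge PySem.Dict.empty from rfl, pv_outer]
  set gathered := scores.foldl (fun g rt =>
      rt.2.foldl (fun g gi => g.modify gi.1 [] (fun cs => cs ++ [gi.2])) g) PySem.Dict.empty with hg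
  have hnd : gathered.keys.Nodup := pv_gathered_nodup scores _ PySem.Dict.nodup_keys_empty
  show (pvMapVal pvMerge gathered).items =
    (List.foldl (fun res p => res.insert p.1 (pvMerge p.2)) PySem.Dict.empty gathered.items).items
  have hfold := PySem.Dict.items_foldl_insert_fresh gathered.items (fun p => p.1)
      (fun p => pvMerge p.2) PySem.Dict.empty (fun p _ => PySem.Dict.contains_empty _) hnd
  rw [hfold]
  simp [pvMapVal, PySem.Dict.empty]
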